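-- pv_equiv track=rewrite | github.com/JuwonKim2022/python_algorithm | ch05/sol0505.py | sol_0505
-- ===== SOURCE A (Python) =====
-- def sol_0505(nums):
--     n = len(nums)
--     minN = 10000000000
--     answer = []
--     nums.sort()
--
--     for i in range(1,n):
--         diff = nums[i] - nums[i-1] #압하고만 비교해도 됨
--         minN = min(minN, diff)
--
--     for i in range(1,n):
--         diff = nums[i] - nums[i-1]
--         if diff == minN:
--             answer.append([nums[i-1], nums[i]])
--
--     return answer
-- ===== SOURCE B (Python) =====
-- def sol_0505(nums):
--     # Single pass over adjacent pairs of the sorted list, tracking the best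
--     # difference and its bucket of pairs (instead of A's two index loops).
--     nums.sort()
--     best = None
--     answer = []
--     for a, b in zip(nums, nums[1:]):
--         d = b - a
--         if best is None or d < best:
--             best = d
--             answer = [[a, b]]
--         elif d == best:
--             answer.append([a, b])
--     return answer
-- ===== Notes on version B (the rewrite author's own statement) =====
-- stated objective: alternative
-- what changed: Replaces A's two index-based passes (one to find the minimum adjacent difference, one to collect matching pairs) with a single pass over zip(nums, nums[1:]) that tracks the best difference and resets/extends its bucket of pairs on the fly.
import Mathlib
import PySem

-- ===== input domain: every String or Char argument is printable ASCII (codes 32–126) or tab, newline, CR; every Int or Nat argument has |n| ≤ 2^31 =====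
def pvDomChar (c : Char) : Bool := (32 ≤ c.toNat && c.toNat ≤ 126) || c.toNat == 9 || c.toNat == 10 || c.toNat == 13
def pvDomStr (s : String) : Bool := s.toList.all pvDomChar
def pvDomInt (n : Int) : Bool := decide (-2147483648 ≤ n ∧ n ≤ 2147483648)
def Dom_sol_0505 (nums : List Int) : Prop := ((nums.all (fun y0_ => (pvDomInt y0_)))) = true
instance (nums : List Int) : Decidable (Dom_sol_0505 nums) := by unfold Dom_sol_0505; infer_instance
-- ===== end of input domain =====

-- B replaces A's two index-based passes with one pass over adjacent pairs of the sorted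
-- list tracking the minimum difference and its bucket; in Python both A and B sort nums
-- in place (same mutation), the equivalence proved here is about the return value.


-- ===== PORT A =====
-- indices i and i-1 are always in range (1 ≤ i < n), so pyGetD with default 0 is exact
def sol_0505 (nums : List Int) : List (List Int) :=
  let s := PySem.List.sorted nums (fun x => x) false
  let n : Int := (s.length : Int)
  let minN : Int :=
    (PySem.List.pyRange 1 n 1).foldl
      (fun m i => min m (PySem.List.pyGetD s i 0 - PySem.List.pyGetD s (i-1) 0))
      10000000000
  (PySem.List.pyRange 1 n 1).foldl
    (fun acc i =>
      if PySem.List.pyGetD s i 0 - PySem.List.pyGetD s (i-1) 0 = minN then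
        acc ++ [[PySem.List.pyGetD s (i-1) 0, PySem.List.pyGetD s i 0]]
      else acc)
    []

-- ===== PORT B =====
-- the loop over zip(nums, nums[1:]) with state (best, answer)
def altLoop : List (Int × Int) → Option Int → List (List Int) → Option Int × List (List Int)
  | [], best, acc => (best, acc)
  | (a, b) :: rest, best, acc =>
    let d := b - a
    match best with
    | none => altLoop rest (some d) [[a, b]]
    | some m =>
      if d < m then altLoop rest (some d) [[a, b]]
      else if d = m then altLoop rest (some m) (acc ++ [[a, b]])
      else altLoop rest (some m) acc

def sol_0505_alt (nums : List Int) : List (List Int) :=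
  let s := PySem.List.sorted nums (fun x => x) false
  (altLoop (s.zip (PySem.List.slice s (some 1) none)) none []).2

-- ===== PRECONDITION & SPEC =====
def Spec_sol_0505 (nums : List Int) (out : List (List Int)) : Prop := out = sol_0505_alt nums
instance (nums : List Int) (out : List (List Int)) : Decidable (Spec_sol_0505 nums out) := by unfold Spec_sol_0505; infer_instance

-- ===== CLAIM (what is proved, stated in full; the proofs are below) =====
def Claim_equal_sol_0505 : Prop := ∀ (nums : List Int), Dom_sol_0505 nums → Spec_sol_0505 nums (sol_0505 nums)

-- ===== LEMMAS AND PROOFS =====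

-- A's index loop over range(1, n) visits exactly the adjacent pairs zip(s, s[1:])
lemma pairs_eq (s : List Int) :
    (PySem.List.pyRange 1 (s.length : Int) 1).map
      (fun i => (PySem.List.pyGetD s (i-1) 0, PySem.List.pyGetD s i 0)) = s.zip s.tail := by
  apply List.ext_getElem
  · simp [PySem.List.length_pyRange_one, List.length_zip, List.length_tail]
  · intro k h1 h2
    have hk : k < s.length - 1 := by
      simpa [PySem.List.length_pyRange_one] using h1
    rw [List.getElem_map, PySem.List.getElem_pyRange_one]
    have e1 : (1 : Int) + k - 1 = (k : Int) := by ring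
    have e2 : (1 : Int) + k = ((k+1 : Nat) : Int) := by push_cast; ring
    rw [e1, e2, PySem.List.pyGetD_natCast, PySem.List.pyGetD_natCast]
    rw [List.getElem_zip]
    have hk1 : k < s.length := by omega
    have hk2 : k + 1 < s.length := by omega
    simp [List.getD_eq_getElem?_getD, List.getElem?_eq_getElem hk1,
      List.getElem?_eq_getElem hk2, List.getElem_tail]

-- a fold of A's index loop equals the same fold over the adjacent pairs
lemma foldA_eq {β : Type} (s : List Int) (g : β → Int × Int → β) (init : β) :
    (PySem.List.pyRange 1 ((s.length : Int)) 1).foldl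
      (fun acc i => g acc (PySem.List.pyGetD s (i-1) 0, PySem.List.pyGetD s i 0)) init
    = (s.zip s.tail).foldl g init := by
  rw [← pairs_eq s, List.foldl_map]

lemma minM_le (l : List (Int × Int)) (m : Int) :
    l.foldl (fun x p => min x (p.2 - p.1)) m ≤ m := by
  induction l generalizing m with
  | nil => simp
  | cons p t ih => exact le_trans (ih _) (min_le_left _ _)

-- invariant of B's loop once a best difference m is established
lemma altLoop_some (l : List (Int × Int)) (m : Int) (acc : List (List Int)) :
    altLoop l (some m) acc =
      (some (l.foldl (fun x p => min x (p.2 - p.1)) m),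
       (if l.foldl (fun x p => min x (p.2 - p.1)) m = m then acc else []) ++
         (l.filter (fun p => p.2 - p.1 = l.foldl (fun x p => min x (p.2 - p.1)) m)).map
           (fun p => [p.1, p.2])) := by
  induction l generalizing m acc with
  | nil => simp [altLoop]
  | cons p t ih =>
    obtain ⟨a, b⟩ := p
    have hle := minM_le t (min m (b - a))
    simp only [altLoop, List.foldl_cons]
    rcases lt_trichotomy (b - a) m with h | h | h
    · have hmin : min m (b - a) = b - a := by omega
      rw [if_pos h, ih]; simp only [hmin]
      rw [hmin] at hle
      have hne : t.foldl (fun x p => min x (p.2 - p.1)) (b - a) ≠ m := by omega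
      simp [List.filter_cons, hne, eq_comm]
      split_ifs <;> simp
    · have hmin : min m (b - a) = m := by omega
      rw [if_neg (by omega), if_pos h, ih]; simp only [hmin]
      by_cases hq : t.foldl (fun x p => min x (p.2 - p.1)) m = m
      · simp [hq, h, eq_comm]
      · have hne : b - a ≠ t.foldl (fun x p => min x (p.2 - p.1)) m := by
          rw [hmin] at hle; omega
        simp [hq, hne]
    · have hmin : min m (b - a) = m := by omega
      rw [if_neg (by omega), if_neg (by omega), ih]; simp only [hmin]
      have hne : b - a ≠ t.foldl (fun x p => min x (p.2 - p.1)) m := by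
        rw [hmin] at hle; omega
      simp [hne]

-- ===== VERDICT (by name: the statement is the Claim_ definition above) =====
theorem sol_0505_spec : Claim_equal_sol_0505 := by
  intro nums hdom
  unfold Spec_sol_0505
  simp only [sol_0505, sol_0505_alt, PySem.List.slice_from_one]
  rw [foldA_eq (PySem.List.sorted nums (fun x => x) false)
        (fun m p => min m (p.2 - p.1)) 10000000000]
  rw [foldA_eq (PySem.List.sorted nums (fun x => x) false)
        (fun acc p =>
          if p.2 - p.1 =
              ((PySem.List.sorted nums (fun x => x) false).zip
                (PySem.List.sorted nums (fun x => x) false).tail).foldl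
                (fun m p => min m (p.2 - p.1)) 10000000000 then
            acc ++ [[p.1, p.2]]
          else acc) []]
  rw [PySem.List.foldl_append_ite]
  cases hP : ((PySem.List.sorted nums (fun x => x) false).zip
      (PySem.List.sorted nums (fun x => x) false).tail) with
  | nil => simp [altLoop]
  | cons p rest =>
    obtain ⟨a, b⟩ := p
    -- a and b are elements of nums, hence bounded; so min(10^10, b-a) = b-a
    have hmem : ((a, b) : Int × Int) ∈ ((PySem.List.sorted nums (fun x => x) false).zip
        (PySem.List.sorted nums (fun x => x) false).tail) := by rw [hP]; exact List.mem_cons_self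
    have hab := List.of_mem_zip hmem
    have ha : a ∈ nums := (PySem.List.mem_sorted _ _ _ _).mp hab.1
    have hb : b ∈ nums := (PySem.List.mem_sorted _ _ _ _).mp (List.mem_of_mem_tail hab.2)
    have hba : b - a ≤ 10000000000 := by
      have h1 := List.all_eq_true.mp hdom a ha
      have h2 := List.all_eq_true.mp hdom b hb
      simp only [pvDomInt, decide_eq_true_eq] at h1 h2
      omega
    have hmin : min (10000000000 : Int) (b - a) = b - a := by omega
    simp only [List.foldl_cons, hmin]
    simp only [altLoop, altLoop_some]
    simp [List.filter_cons, eq_comm]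
    split_ifs <;> simp
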